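-- pv_equiv track=rewrite | github.com/harshini4506/AI-Healthcare-diagnosis | AI healthcare Diagnosis final/AI healthcare Diagnosis (2)/AI healthcare Diagnosis/AI healthcare Diagnosis/models/image_analyzer.py | _process_report_text
-- ===== SOURCE A (Python) =====
-- from typing import Dict, List, Any
--
-- def _process_report_text(text: str) -> Dict[str, Any]:
--     """Process extracted text from medical reports"""
--     # Define keywords for different types of information
--     keywords = {
--         'diagnosis': ['diagnosis', 'impression', 'finding', 'conclusion'],
--         'recommendations': ['recommendation', 'advice', 'suggestion', 'plan'],
--         'medications': ['medication', 'prescription', 'drug', 'tablet'],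
--         'follow_up': ['follow up', 'follow-up', 'review', 'revisit']
--     }
--
--     report_info = {
--         'diagnosis': [],
--         'recommendations': [],
--         'medications': [],
--         'follow_up': []
--     }
--
--     # Process each line of text
--     for line in text.split('\n'):
--         line = line.strip().lower()
--         if not line:
--             continue
--
--         # Check for keywords and categorize information
--         for category, words in keywords.items():
--             if any(word in line for word in words):
--                 report_info[category].append(line)
--
--     return report_info
-- ===== SOURCE B (Python) =====
-- def _process_report_text(text: str):
--     """Process extracted text from medical reports"""
--     keywords = {
--         'diagnosis': ['diagnosis', 'impression', 'finding', 'conclusion'],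
--         'recommendations': ['recommendation', 'advice', 'suggestion', 'plan'],
--         'medications': ['medication', 'prescription', 'drug', 'tablet'],
--         'follow_up': ['follow up', 'follow-up', 'review', 'revisit']
--     }
--     cleaned = [s for s in (l.strip().lower() for l in text.split('\n')) if s]
--     # inverted index: for each keyword the set of line indices containing it;
--     # a category's lines are the sorted union of its keywords' index sets
--     return {cat: [cleaned[i]
--                   for i in sorted(set().union(*({i for i, s in enumerate(cleaned) if w in s}
--                                                 for w in words)))]
--             for cat, words in keywords.items()}
-- ===== Notes on version B (the rewrite author's own statement) =====
-- stated objective: alternative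
-- what changed: Replaces A's single interleaved pass (outer loop over lines, inner over categories, appending into a mutable dict of lists) with an inverted index: per keyword the set of matching line indices, then each category is the sorted union of its keywords' index sets mapped back to lines.
import Mathlib
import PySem

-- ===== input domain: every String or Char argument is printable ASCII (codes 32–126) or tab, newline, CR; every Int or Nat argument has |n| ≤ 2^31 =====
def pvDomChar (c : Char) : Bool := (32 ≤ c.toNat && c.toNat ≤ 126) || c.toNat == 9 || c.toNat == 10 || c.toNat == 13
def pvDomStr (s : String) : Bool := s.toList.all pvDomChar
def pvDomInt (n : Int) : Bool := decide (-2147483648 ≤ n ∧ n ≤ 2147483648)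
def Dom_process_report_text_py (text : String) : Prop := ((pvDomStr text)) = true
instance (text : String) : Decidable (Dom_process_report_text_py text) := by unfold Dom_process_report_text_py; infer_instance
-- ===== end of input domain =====

-- B replaces A's interleaved per-line pass (mutable dict of lists) with an inverted index:
-- per-keyword sets of line indices, unioned per category, sorted and mapped back to lines.

-- ===== PORT A =====
-- the hard-coded keyword table
def kwA : List (String × List String) :=
  [("diagnosis", ["diagnosis", "impression", "finding", "conclusion"]),
   ("recommendations", ["recommendation", "advice", "suggestion", "plan"]),
   ("medications", ["medication", "prescription", "drug", "tablet"]),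
   ("follow_up", ["follow up", "follow-up", "review", "revisit"])]

-- the inner 'for category, words in keywords.items()' loop for one (already cleaned, non-empty) line;
-- report_info[category].append(line) is Dict.modify (the key is always present)
def lineStepA (d : PySem.Dict String (List String)) (l : String) : PySem.Dict String (List String) :=
  kwA.foldl (fun d cw =>
    if cw.2.any (fun w => PySem.Str.isIn w l) then d.modify cw.1 [] (fun v => v ++ [l]) else d) d

def process_report_text_py (text : String) : List (String × List String) :=
  let report_info : PySem.Dict String (List String) :=
    PySem.Dict.ofList [("diagnosis", []), ("recommendations", []), ("medications", []), ("follow_up", [])]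
  -- text.split('\n'): the separator is non-empty, so split? never returns none
  (((PySem.Str.split? text "\n").getD []).foldl (fun d line =>
      let l := PySem.Str.lower (PySem.Str.strip line)
      if l == "" then d else lineStepA d l) report_info).items

-- ===== PORT B =====
def kwB : List (String × List String) :=
  [("diagnosis", ["diagnosis", "impression", "finding", "conclusion"]),
   ("recommendations", ["recommendation", "advice", "suggestion", "plan"]),
   ("medications", ["medication", "prescription", "drug", "tablet"]),
   ("follow_up", ["follow up", "follow-up", "review", "revisit"])]

-- {i for i, s in enumerate(cleaned) if w in s}
def idxSetB (cleaned : List String) (w : String) : PySem.Set Int :=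
  PySem.Set.ofList (((PySem.List.enumerate cleaned 0).filter (fun p => PySem.Str.isIn w p.2)).map (fun p => p.1))

def process_report_text_py_alt (text : String) : List (String × List String) :=
  let cleaned := (((PySem.Str.split? text "\n").getD []).map
      (fun l => PySem.Str.lower (PySem.Str.strip l))).filter (fun s => !(s == ""))
  -- sorted(set().union(*(… for w in words))) — the union folded over the word list, then sorted
  kwB.map (fun cw => (cw.1,
    (PySem.List.sorted
        (cw.2.foldl (fun s w => PySem.Set.union s (idxSetB cleaned w)) PySem.Set.empty)
        (fun x => x) false).map
      (fun i => (PySem.List.pyGet? cleaned i).getD "")))   -- cleaned[i]: i always in range here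

-- ===== PRECONDITION & SPEC =====
def Spec_process_report_text_py (text : String) (out : List (String × List String)) : Prop := out = process_report_text_py_alt text
instance (text : String) (out : List (String × List String)) : Decidable (Spec_process_report_text_py text out) := by unfold Spec_process_report_text_py; infer_instance

-- ===== CLAIM (what is proved, stated in full; the proofs are below) =====
def Claim_equal_process_report_text_py : Prop := ∀ (text : String), Dom_process_report_text_py text → Spec_process_report_text_py text (process_report_text_py text)

-- ===== LEMMAS AND PROOFS =====

-- shorthand for the category test
def matchesCat (ws : List String) (l : String) : Bool := ws.any (fun w => PySem.Str.isIn w l)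

-- the strictly increasing list of (Int) indices of cs whose element satisfies p
def idxListT (cs : List String) (p : String → Bool) : List Int :=
  ((List.range cs.length).filter (fun k => p (cs[k]?.getD ""))).map (fun k : Nat => (k : Int))

-- ---- A side ----

-- one cleaned line through A's inner loop, on the concrete 4-key dict
lemma lineStepA_mk (l : String) (v1 v2 v3 v4 : List String) :
    lineStepA (PySem.Dict.mk [("diagnosis", v1), ("recommendations", v2), ("medications", v3), ("follow_up", v4)]) l
      = PySem.Dict.mk
          [("diagnosis", v1 ++ if matchesCat ["diagnosis", "impression", "finding", "conclusion"] l then [l] else []),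
           ("recommendations", v2 ++ if matchesCat ["recommendation", "advice", "suggestion", "plan"] l then [l] else []),
           ("medications", v3 ++ if matchesCat ["medication", "prescription", "drug", "tablet"] l then [l] else []),
           ("follow_up", v4 ++ if matchesCat ["follow up", "follow-up", "review", "revisit"] l then [l] else [])] := by
  simp only [lineStepA, kwA, matchesCat, List.foldl]
  split_ifs <;>
    simp [PySem.Dict.modify, PySem.Dict.insert, PySem.Dict.getD, PySem.Dict.get?,
          PySem.Dict.contains]

-- A's whole fold over the cleaned lines, as per-category filters
lemma foldA_eq (cs : List String) (v1 v2 v3 v4 : List String) :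
    (cs.foldl lineStepA
        (PySem.Dict.mk [("diagnosis", v1), ("recommendations", v2), ("medications", v3), ("follow_up", v4)])).items
      = [("diagnosis", v1 ++ cs.filter (matchesCat ["diagnosis", "impression", "finding", "conclusion"])),
         ("recommendations", v2 ++ cs.filter (matchesCat ["recommendation", "advice", "suggestion", "plan"])),
         ("medications", v3 ++ cs.filter (matchesCat ["medication", "prescription", "drug", "tablet"])),
         ("follow_up", v4 ++ cs.filter (matchesCat ["follow up", "follow-up", "review", "revisit"]))] := by
  induction cs generalizing v1 v2 v3 v4 with
  | nil => simp
  | cons c cs ih =>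
    rw [List.foldl_cons, lineStepA_mk, ih]
    simp only [List.filter_cons]
    split_ifs <;> simp_all

-- cleaning each line inside A's loop and skipping the empty ones = mapping and filtering first
lemma foldl_clean (ls : List String) (d : PySem.Dict String (List String)) :
    ls.foldl (fun d line =>
        if (PySem.Str.lower (PySem.Str.strip line) == "") = true then d
        else lineStepA d (PySem.Str.lower (PySem.Str.strip line))) d
      = ((ls.map (fun l => PySem.Str.lower (PySem.Str.strip l))).filter (fun s => !(s == ""))).foldl lineStepA d := by
  induction ls generalizing d with
  | nil => simp only [List.map_nil, List.filter_nil, List.foldl_nil]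
  | cons x xs ih =>
    cases h : (PySem.Str.lower (PySem.Str.strip x) == "") with
    | true =>
      simp only [List.foldl_cons, List.map_cons, List.filter_cons, h, Bool.not_true, reduceIte]
      exact ih d
    | false =>
      simp only [List.foldl_cons, List.map_cons, List.filter_cons, h, Bool.not_false, reduceIte]
      exact ih _

-- ---- B side ----

lemma mem_idxSetB (cs : List String) (w : String) (i : Int) :
    i ∈ idxSetB cs w ↔ ∃ k : Nat, ∃ _ : k < cs.length, i = (k : Int) ∧ PySem.Str.isIn w (cs[k]?.getD "") := by
  simp only [idxSetB, PySem.Set.mem_ofList, List.mem_map, List.mem_filter,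
    PySem.List.mem_enumerate_iff]
  constructor
  · rintro ⟨p, ⟨⟨k, hk, rfl⟩, hin⟩, rfl⟩
    exact ⟨k, hk, by simp, by simpa [List.getElem?_eq_getElem hk] using hin⟩
  · rintro ⟨k, hk, rfl, hin⟩
    exact ⟨((k : Int), cs[k]), ⟨⟨k, hk, by simp⟩, by simpa [List.getElem?_eq_getElem hk] using hin⟩, rfl⟩

lemma mem_unionFold (cs : List String) (ws : List String) (s : PySem.Set Int) (i : Int) :
    i ∈ ws.foldl (fun s w => PySem.Set.union s (idxSetB cs w)) s ↔ i ∈ s ∨ ∃ w ∈ ws, i ∈ idxSetB cs w := by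
  induction ws generalizing s with
  | nil => simp
  | cons w ws ih =>
    rw [List.foldl_cons, ih]
    simp [PySem.Set.mem_union]
    tauto

lemma nodup_unionFold (cs : List String) (ws : List String) (s : PySem.Set Int) (hs : s.Nodup) :
    (ws.foldl (fun s w => PySem.Set.union s (idxSetB cs w)) s).Nodup := by
  induction ws generalizing s with
  | nil => exact hs
  | cons w ws ih => exact ih _ (PySem.Set.nodup_union _ _ hs)

lemma mem_idxListT (cs : List String) (p : String → Bool) (i : Int) :
    i ∈ idxListT cs p ↔ ∃ k : Nat, ∃ _ : k < cs.length, i = (k : Int) ∧ p (cs[k]?.getD "") := by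
  simp only [idxListT, List.mem_map, List.mem_filter, List.mem_range]
  constructor
  · rintro ⟨k, ⟨hk, hp⟩, rfl⟩; exact ⟨k, hk, rfl, hp⟩
  · rintro ⟨k, hk, rfl, hp⟩; exact ⟨k, ⟨hk, hp⟩, rfl⟩

lemma pairwise_lt_idxListT (cs : List String) (p : String → Bool) :
    (idxListT cs p).Pairwise (· < ·) := by
  refine List.Pairwise.map _ (fun a b h => ?_) (List.Pairwise.filter _ (List.pairwise_lt_range))
  exact_mod_cast h

-- the sorted union of the per-word index sets IS the increasing index list of the matching lines
lemma sorted_unionFold (cs : List String) (ws : List String) :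
    PySem.List.sorted (ws.foldl (fun s w => PySem.Set.union s (idxSetB cs w)) PySem.Set.empty)
        (fun x => x) false
      = idxListT cs (matchesCat ws) := by
  apply PySem.List.sorted_eq_of_perm_of_pairwise_lt
  · apply (List.perm_ext_iff_of_nodup _ _).mpr
    · intro i
      rw [mem_idxListT, mem_unionFold]
      simp only [matchesCat, List.any_eq_true, PySem.Set.empty]
      constructor
      · rintro ⟨k, hk, rfl, w, hw, hin⟩
        exact Or.inr ⟨w, hw, (mem_idxSetB cs w _).mpr ⟨k, hk, rfl, hin⟩⟩
      · rintro (h | ⟨w, hw, hin⟩)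
        · simp at h
        · obtain ⟨k, hk, hik, hin2⟩ := (mem_idxSetB cs w _).mp hin
          subst hik
          exact ⟨k, hk, rfl, w, hw, hin2⟩
    · exact (pairwise_lt_idxListT cs (matchesCat ws)).imp ne_of_lt
    · exact nodup_unionFold cs ws _ List.nodup_nil
  · exact pairwise_lt_idxListT cs (matchesCat ws)

-- mapping the increasing matching indices back through cs[·] is just the filter
lemma filter_range_map (cs : List String) (p : String → Bool) :
    ((List.range cs.length).filter (fun k => p (cs[k]?.getD ""))).map (fun k => cs[k]?.getD "") = cs.filter p := by
  induction cs with
  | nil => simp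
  | cons c cs ih =>
    simp only [List.length_cons, List.range_succ_eq_map, List.filter_cons, List.filter_map,
      List.getElem?_cons_zero, Option.getD_some]
    have h1 : ((fun k => p ((c :: cs)[k]?.getD "")) ∘ Nat.succ) = fun k => p (cs[k]?.getD "") := by
      funext k; simp
    have h2 : ((fun k => (c :: cs)[k]?.getD "") ∘ Nat.succ) = fun k => cs[k]?.getD "" := by
      funext k; simp
    split_ifs <;>
      simp only [List.map_cons, List.getElem?_cons_zero, Option.getD_some, List.map_map, h1, h2, ih]

lemma map_get_idxListT (cs : List String) (p : String → Bool) :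
    (idxListT cs p).map (fun i => (PySem.List.pyGet? cs i).getD "") = cs.filter p := by
  rw [idxListT, List.map_map]
  have h3 : ((fun i => (PySem.List.pyGet? cs i).getD "") ∘ fun k : Nat => (k : Int))
      = fun k : Nat => cs[k]?.getD "" := by
    funext k
    simp [PySem.List.pyGet?_natCast]
  rw [h3, filter_range_map]

-- one category of B equals the plain filter
lemma catB_eq (cs : List String) (ws : List String) :
    (PySem.List.sorted (ws.foldl (fun s w => PySem.Set.union s (idxSetB cs w)) PySem.Set.empty)
        (fun x => x) false).map (fun i => (PySem.List.pyGet? cs i).getD "")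
      = cs.filter (matchesCat ws) := by
  rw [sorted_unionFold, map_get_idxListT]

theorem process_report_text_py_spec' (text : String) :
    process_report_text_py text = process_report_text_py_alt text := by
  simp only [process_report_text_py, process_report_text_py_alt]
  rw [foldl_clean]
  rw [show PySem.Dict.ofList [("diagnosis", ([] : List String)), ("recommendations", []), ("medications", []), ("follow_up", [])]
        = PySem.Dict.mk [("diagnosis", []), ("recommendations", []), ("medications", []), ("follow_up", [])] from rfl]
  rw [foldA_eq]
  simp only [kwB, List.map_cons, List.map_nil, catB_eq]
  simp

-- ===== VERDICT (by name: the statement is the Claim_ definition above) =====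
theorem process_report_text_py_spec : Claim_equal_process_report_text_py := by
  intro text _
  exact process_report_text_py_spec' text
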